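-- pv_equiv track=rewrite | github.com/selenkaptanoglu/python_examples | python_examples.py | func
-- ===== SOURCE A (Python) =====
-- def func(l):
--     groups=[[],[]]
--     for i,letter in enumerate(l):
--         if i%2==0:
--             groups[0].append(i)
--         else:
--             groups[1].append(i)
--     return(groups)
-- ===== SOURCE B (Python) =====
-- def func(l):
--     n = len(l)
--     return [list(range(0, n, 2)), list(range(1, n, 2))]
-- ===== Notes on version B (the rewrite author's own statement) =====
-- stated objective: idiomatic
-- what changed: B derives the even- and odd-index lists directly from len(l) via two strided range() calls, removing A's enumerate loop with its per-element parity test and appends.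
import Mathlib
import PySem

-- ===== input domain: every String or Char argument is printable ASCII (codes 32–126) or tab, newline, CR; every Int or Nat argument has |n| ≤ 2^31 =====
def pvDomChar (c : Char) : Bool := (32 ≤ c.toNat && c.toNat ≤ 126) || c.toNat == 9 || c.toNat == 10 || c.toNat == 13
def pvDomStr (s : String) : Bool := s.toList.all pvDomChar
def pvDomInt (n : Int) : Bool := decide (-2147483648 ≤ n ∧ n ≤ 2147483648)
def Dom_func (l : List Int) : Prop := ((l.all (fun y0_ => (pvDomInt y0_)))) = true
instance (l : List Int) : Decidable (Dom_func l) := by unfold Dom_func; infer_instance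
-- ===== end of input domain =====

-- B replaces A's enumerate loop with two strided ranges computed from the length (idiomatic).

-- ===== PORT A =====
-- groups=[[],[]] kept as a pair of lists; the loop appends the index to the matching side.
def funcStep (g : List Int × List Int) (p : Int × Int) : List Int × List Int :=
  if p.1 % 2 == 0 then (g.1 ++ [p.1], g.2) else (g.1, g.2 ++ [p.1])

def func (l : List Int) : List (List Int) :=
  let groups := (PySem.List.enumerate l).foldl funcStep ([], [])
  [groups.1, groups.2]

-- ===== PORT B =====
def func_alt (l : List Int) : List (List Int) :=
  let n : Int := l.length
  [PySem.List.pyRange 0 n 2, PySem.List.pyRange 1 n 2]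

-- ===== PRECONDITION & SPEC =====
def Spec_func (l : List Int) (out : List (List Int)) : Prop := out = func_alt l
instance (l : List Int) (out : List (List Int)) : Decidable (Spec_func l out) := by unfold Spec_func; infer_instance

-- ===== CLAIM (what is proved, stated in full; the proofs are below) =====
def Claim_equal_func : Prop := ∀ (l : List Int), Dom_func l → Spec_func l (func l)

-- ===== LEMMAS AND PROOFS =====

lemma pyRange_even (n : Nat) :
    PySem.List.pyRange 0 (n : Int) 2 = (List.range ((n + 1) / 2)).map (fun k : Nat => 2 * (k : Int)) := by
  rw [PySem.List.pyRange_of_pos _ _ (by norm_num)]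
  have hc : (if (0 : Int) < (n : Int) then (((n : Int) - 0 + 2 - 1) / 2).toNat else 0) = (n + 1) / 2 := by
    split_ifs with h <;> omega
  rw [hc]
  exact List.map_congr_left (fun k _ => by ring)

lemma pyRange_odd (n : Nat) :
    PySem.List.pyRange 1 (n : Int) 2 = (List.range (n / 2)).map (fun k : Nat => 2 * (k : Int) + 1) := by
  rw [PySem.List.pyRange_of_pos _ _ (by norm_num)]
  have hc : (if (1 : Int) < (n : Int) then (((n : Int) - 1 + 2 - 1) / 2).toNat else 0) = n / 2 := by
    split_ifs with h <;> omega
  rw [hc]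
  exact List.map_congr_left (fun k _ => by ring)

lemma core (n : Nat) :
    (List.range n).foldl (fun g (k : Nat) => funcStep g ((k : Int), 0)) ([], []) =
      (PySem.List.pyRange 0 (n : Int) 2, PySem.List.pyRange 1 (n : Int) 2) := by
  induction n with
  | zero => simp [PySem.List.pyRange_of_pos]
  | succ n ih =>
    rw [List.range_succ, List.foldl_append, ih]
    rcases Nat.even_or_odd n with ⟨m, hm⟩ | ⟨m, hm⟩
    · subst hm
      have hmod : ((((m + m : Nat)) : Int) % 2 == 0) = true := by
        rw [beq_iff_eq]; push_cast; omega
      simp only [List.foldl_cons, List.foldl_nil, funcStep, hmod, if_true]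
      rw [pyRange_even, pyRange_even, pyRange_odd, pyRange_odd]
      simp only [Prod.mk.injEq]
      constructor
      · have h1 : (m + m + 1 + 1) / 2 = m + 1 := by omega
        have h2 : (m + m + 1) / 2 = m := by omega
        rw [h1, h2, List.range_succ, List.map_append]
        congr 1
        all_goals try congr 1
        all_goals push_cast
        all_goals try ring
      · congr 2
        omega
    · subst hm
      have hmod : ((((2 * m + 1 : Nat)) : Int) % 2 == 0) = false := by
        rw [beq_eq_false_iff_ne]; push_cast; omega
      simp only [List.foldl_cons, List.foldl_nil, funcStep, hmod, Bool.false_eq_true,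
        if_false]
      rw [pyRange_even, pyRange_even, pyRange_odd, pyRange_odd]
      simp only [Prod.mk.injEq]
      constructor
      · congr 2
        omega
      · have h1 : (2 * m + 1 + 1) / 2 = m + 1 := by omega
        have h2 : (2 * m + 1) / 2 = m := by omega
        rw [h1, h2, List.range_succ, List.map_append]
        congr 1

-- ===== VERDICT (by name: the statement is the Claim_ definition above) =====
theorem func_spec : Claim_equal_func := by
  intro l _
  simp only [Spec_func, func, func_alt]
  rw [PySem.List.enumerate_eq_map_pyRange l 0, List.foldl_map]
  simp only [PySem.List.len_eq]
  rw [PySem.List.pyRange_zero_natCast, List.foldl_map]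
  have hstep : (List.range l.length).foldl
      (fun g (k : Nat) => funcStep g ((k : Int), PySem.List.pyGetD l (k : Int) 0)) ([], []) =
      (List.range l.length).foldl (fun g (k : Nat) => funcStep g ((k : Int), 0)) ([], []) := by
    apply PySem.List.foldl_congr_mem
    intro acc k _
    simp [funcStep]
  rw [hstep, core]
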